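-- pv_equiv track=rewrite | github.com/JrJuni/bd-coldcall-agent | src/rag/chunker.py | _tail_for_overlap
-- ===== SOURCE A (Python) =====
-- def _tail_for_overlap(units: list[str], max_chars: int) -> list[str]:
--     if max_chars <= 0 or not units:
--         return []
--     tail: list[str] = []
--     for u in reversed(units):
--         candidate = [u] + tail
--         joined_len = sum(len(x) for x in candidate) + (len(candidate) - 1)
--         if joined_len > max_chars:
--             break
--         tail = candidate
--     return tail
-- ===== SOURCE B (Python) =====
-- def _tail_for_overlap(units: list[str], max_chars: int) -> list[str]:
--     if max_chars <= 0 or not units: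
--         return []
--     n = len(units)
--     # suffix-length table: suff[k] = total length of the last k units
--     suff = [0]
--     total = 0
--     for u in reversed(units):
--         total += len(u)
--         suff.append(total)
--     # binary search for the largest k with joined length suff[k] + (k-1) <= max_chars
--     lo, hi = 0, n
--     while lo < hi:
--         mid = (lo + hi + 1) // 2
--         if suff[mid] + mid - 1 <= max_chars:
--             lo = mid
--         else:
--             hi = mid - 1
--     return units[n - lo:]
-- ===== Notes on version B (the rewrite author's own statement) =====
-- stated objective: faster
-- what changed: Replaces the greedy reverse loop that rebuilds and re-sums a growing candidate list each step with a precomputed suffix-length table plus a binary search for the longest fitting suffix, returned as a slice.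
import Mathlib
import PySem

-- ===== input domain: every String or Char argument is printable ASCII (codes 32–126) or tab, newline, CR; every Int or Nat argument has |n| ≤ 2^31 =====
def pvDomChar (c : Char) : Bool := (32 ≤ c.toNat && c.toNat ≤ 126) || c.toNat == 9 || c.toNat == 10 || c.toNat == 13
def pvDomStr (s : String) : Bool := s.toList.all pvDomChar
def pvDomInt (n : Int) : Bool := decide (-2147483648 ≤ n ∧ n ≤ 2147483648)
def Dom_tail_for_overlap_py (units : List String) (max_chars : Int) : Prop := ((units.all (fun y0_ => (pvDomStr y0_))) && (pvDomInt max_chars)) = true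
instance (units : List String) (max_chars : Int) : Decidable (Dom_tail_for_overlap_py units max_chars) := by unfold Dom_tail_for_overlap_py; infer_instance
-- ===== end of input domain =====

-- B replaces A's greedy reverse loop (which re-sums a growing candidate list each step)
-- by a suffix-length table plus a binary search for the longest fitting suffix; objective: faster.

-- ===== PORT A =====
-- the loop body: candidate = [u] + tail; joined_len = sum(len(x) for x in candidate) + (len(candidate)-1)
def pvLoopA (max_chars : Int) : List String → List String → List String
  | [], tail => tail
  | u :: rest, tail =>
      let candidate := u :: tail
      let joined_len : Int :=
        (candidate.map (fun x => (x.length : Int))).sum + ((candidate.length : Int) - 1)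
      if joined_len > max_chars then tail
      else pvLoopA max_chars rest candidate

def tail_for_overlap_py (units : List String) (max_chars : Int) : List String :=
  if max_chars ≤ 0 ∨ units = [] then []
  else pvLoopA max_chars units.reverse []

-- ===== PORT B =====
-- the `for u in reversed(units): total += len(u); suff.append(total)` loop,
-- producing the appended elements [len_1, len_1+len_2, …] (suff without its leading 0)
def pvBuildSuff : List Int → Int → List Int
  | [], _ => []
  | l :: rest, total => (total + l) :: pvBuildSuff rest (total + l)

-- the `while lo < hi` binary-search loop; suff[mid] is `getD mid 0` (all accesses are in range)
def pvBsearch (suff : List Int) (max_chars : Int) (lo hi : Nat) : Nat :=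
  if _h : lo < hi then
    let mid := (lo + hi + 1) / 2
    if suff.getD mid 0 + (mid : Int) - 1 ≤ max_chars then
      pvBsearch suff max_chars mid hi
    else
      pvBsearch suff max_chars lo (mid - 1)
  else lo
termination_by hi - lo
decreasing_by all_goals omega

def tail_for_overlap_py_alt (units : List String) (max_chars : Int) : List String :=
  if max_chars ≤ 0 ∨ units = [] then []
  else
    let n := units.length
    let suff : List Int := 0 :: pvBuildSuff (units.reverse.map (fun u => (u.length : Int))) 0
    let lo := pvBsearch suff max_chars 0 n
    -- units[n - lo:] with 0 ≤ n - lo ≤ n, so the Python slice is exactly drop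
    units.drop (n - lo)

-- ===== PRECONDITION & SPEC =====
def Spec_tail_for_overlap_py (units : List String) (max_chars : Int) (out : List String) : Prop := out = tail_for_overlap_py_alt units max_chars
instance (units : List String) (max_chars : Int) (out : List String) : Decidable (Spec_tail_for_overlap_py units max_chars out) := by unfold Spec_tail_for_overlap_py; infer_instance

-- ===== CLAIM (what is proved, stated in full; the proofs are below) =====
def Claim_equal_tail_for_overlap_py : Prop := ∀ (units : List String) (max_chars : Int), Dom_tail_for_overlap_py units max_chars → Spec_tail_for_overlap_py units max_chars (tail_for_overlap_py units max_chars)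

-- ===== LEMMAS AND PROOFS =====

-- joined length of the suffix of the last k units (k ≤ n): total chars + (k-1) separators
def Jf (units : List String) (k : Nat) : Int :=
  ((units.drop (units.length - k)).map (fun x => (x.length : Int))).sum + (k : Int) - 1

theorem Jf_zero (units : List String) : Jf units 0 = -1 := by
  simp [Jf]

theorem drop_sub_succ (units : List String) (k : Nat) (hk : k < units.length) :
    units.drop (units.length - (k + 1)) =
      units[units.length - (k + 1)]'(by omega) :: units.drop (units.length - k) := by
  have hi : units.length - (k + 1) + 1 = units.length - k := by omega
  rw [List.drop_eq_getElem_cons (l := units) (i := units.length - (k + 1)) (by omega), hi]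

theorem sum_len_drop_le (units : List String) (a b : Nat) (hab : a ≤ b) :
    ((units.drop b).map (fun x => (x.length : Int))).sum ≤
      ((units.drop a).map (fun x => (x.length : Int))).sum := by
  have hd : units.drop b = (units.drop a).drop (b - a) := by
    rw [List.drop_drop]
    congr 1
    omega
  rw [hd]
  conv_rhs => rw [← List.take_append_drop (b - a) (units.drop a)]
  rw [List.map_append, List.sum_append]
  have h0 : 0 ≤ (((units.drop a).take (b - a)).map (fun x => (x.length : Int))).sum := by
    apply List.sum_nonneg
    intro x hx
    simp only [List.mem_map] at hx
    obtain ⟨s, _, rfl⟩ := hx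
    positivity
  omega

theorem Jf_mono (units : List String) (i j : Nat) (hij : i ≤ j) (hj : j ≤ units.length) :
    Jf units i ≤ Jf units j := by
  unfold Jf
  have hs := sum_len_drop_le units (units.length - j) (units.length - i) (by omega)
  omega

-- suffix-table correctness: entry k of [0] ++ buildSuff is the sum of the first k reversed lengths
theorem buildSuff_getD (lens : List Int) (t : Int) (k : Nat) (hk : k < lens.length) :
    (pvBuildSuff lens t).getD k 0 = t + (lens.take (k + 1)).sum := by
  induction lens generalizing t k with
  | nil => simp at hk
  | cons l rest ih =>
      cases k with
      | zero => simp [pvBuildSuff]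
      | succ m =>
          have hm : m < rest.length := by simpa using hk
          have h1 := ih (t + l) m hm
          simp only [pvBuildSuff, List.getD_cons_succ, List.take_succ_cons, List.sum_cons]
          rw [h1]
          ring

theorem suff_getD (units : List String) (k : Nat) (hk : k ≤ units.length) :
    ((0 : Int) :: pvBuildSuff (units.reverse.map (fun u => (u.length : Int))) 0).getD k 0 =
      ((units.drop (units.length - k)).map (fun x => (x.length : Int))).sum := by
  cases k with
  | zero => simp
  | succ m =>
      have hlen : (units.reverse.map (fun u => (u.length : Int))).length = units.length := by simp
      have h1 : ((0 : Int) :: pvBuildSuff (units.reverse.map (fun u => (u.length : Int))) 0).getD (m + 1) 0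
          = (pvBuildSuff (units.reverse.map (fun u => (u.length : Int))) 0).getD m 0 := by
        simp
      rw [h1, buildSuff_getD _ 0 m (by omega)]
      have h2 : units.reverse.map (fun u => (u.length : Int)) = (units.map (fun u => (u.length : Int))).reverse := by
        simp
      rw [h2]
      rw [List.take_reverse]
      rw [List.sum_reverse]
      have h3 : (units.map (fun u => (u.length : Int))).drop ((units.map (fun u => (u.length : Int))).length - (m + 1))
          = (units.drop (units.length - (m + 1))).map (fun u => (u.length : Int)) := by
        rw [List.length_map, ← List.map_drop]
      rw [h3]
      simp

-- findGreatest is unchanged when the predicate fails on all of (m, M]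
theorem findGreatest_high_none (P : Nat → Prop) [DecidablePred P] (m M : Nat) (hmM : m ≤ M)
    (h : ∀ k, m < k → k ≤ M → ¬ P k) :
    Nat.findGreatest P M = Nat.findGreatest P m := by
  induction M with
  | zero =>
      have : m = 0 := by omega
      rw [this]
  | succ M' ih =>
      rcases Nat.eq_or_lt_of_le hmM with he | hlt
      · rw [he]
      · rw [Nat.findGreatest_succ, if_neg (h (M' + 1) (by omega) (by omega))]
        exact ih (by omega) (fun k h1 h2 => h k h1 (by omega))

-- the binary search computes the greatest fitting k ≤ hi
theorem pvBsearch_eq (units : List String) (mc : Int) (lo hi : Nat)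
    (hlohi : lo ≤ hi) (hhi : hi ≤ units.length) (hfit : Jf units lo ≤ mc) :
    pvBsearch ((0 : Int) :: pvBuildSuff (units.reverse.map (fun u => (u.length : Int))) 0) mc lo hi
      = Nat.findGreatest (fun k => Jf units k ≤ mc) hi := by
  induction lo, hi using pvBsearch.induct ((0 : Int) :: pvBuildSuff (units.reverse.map (fun u => (u.length : Int))) 0) mc with
  | case1 lo hi h mid hcond ih =>
      rw [pvBsearch, dif_pos h, if_pos hcond]
      have hmid : mid ≤ hi := by omega
      have hfitmid : Jf units mid ≤ mc := by
        have := suff_getD units mid (by omega)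
        unfold Jf
        rw [← this]
        omega
      exact ih hmid hhi hfitmid
  | case2 lo hi h mid hcond ih =>
      rw [pvBsearch, dif_pos h, if_neg hcond]
      have hnotmid : ¬ Jf units mid ≤ mc := by
        have := suff_getD units mid (by omega)
        unfold Jf
        rw [← this]
        omega
      have heq : Nat.findGreatest (fun k => Jf units k ≤ mc) hi
          = Nat.findGreatest (fun k => Jf units k ≤ mc) (mid - 1) := by
        apply findGreatest_high_none _ (mid - 1) hi (by omega)
        intro k h1 h2 hPk
        exact hnotmid (le_trans (Jf_mono units mid k (by omega) (by omega)) hPk)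
      rw [heq]
      exact ih (by omega) (by omega) hfit
  | case3 lo hi h =>
      have hle : lo = hi := by omega
      subst hle
      rw [pvBsearch, dif_neg h]
      symm
      rw [Nat.findGreatest_eq_iff]
      exact ⟨le_rfl, fun _ => hfit, fun k h1 h2 => by omega⟩

-- A's loop, after consuming j reversed units without breaking, returns the greatest fitting suffix
theorem pvLoopA_eq (units : List String) (mc : Int) (m j : Nat)
    (hm : m = units.length - j) (hj : j ≤ units.length) (hfit : Jf units j ≤ mc) :
    pvLoopA mc (units.reverse.drop j) (units.drop (units.length - j))
      = units.drop (units.length - Nat.findGreatest (fun k => Jf units k ≤ mc) units.length) := by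
  induction m generalizing j with
  | zero =>
      have hj' : j = units.length := by omega
      subst hj'
      have h1 : units.reverse.drop units.length = [] := by
        apply List.drop_eq_nil_of_le; simp
      have h2 : Nat.findGreatest (fun k => Jf units k ≤ mc) units.length = units.length := by
        rw [Nat.findGreatest_eq_iff]
        exact ⟨le_rfl, fun _ => hfit, fun k h1 h2 => by omega⟩
      rw [h1, h2]
      rfl
  | succ m' ih =>
      have hjlt : j < units.length := by omega
      have hrev : units.reverse.drop j
          = units.reverse[j]'(by simpa using hjlt) :: units.reverse.drop (j + 1) :=
        List.drop_eq_getElem_cons (by simpa using hjlt)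
      have hget : units.reverse[j]'(by simpa using hjlt)
          = units[units.length - (j + 1)]'(by omega) := by
        rw [List.getElem_reverse]
        congr 1
        omega
      rw [hrev, hget]
      rw [pvLoopA]
      have hcand : units[units.length - (j + 1)]'(by omega) :: units.drop (units.length - j)
          = units.drop (units.length - (j + 1)) := (drop_sub_succ units j hjlt).symm
      simp only [hcand]
      have hlen : (units.drop (units.length - (j + 1))).length = j + 1 := by
        simp; omega
      have hjoin : ((units.drop (units.length - (j + 1))).map (fun x => (x.length : Int))).sum
          + (((units.drop (units.length - (j + 1))).length : Int) - 1) = Jf units (j + 1) := by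
        rw [hlen]
        unfold Jf
        push_cast
        ring
      by_cases hbr : Jf units (j + 1) > mc
      · rw [if_pos (by rw [hjoin]; exact hbr)]
        have h2 : Nat.findGreatest (fun k => Jf units k ≤ mc) units.length = j := by
          rw [Nat.findGreatest_eq_iff]
          refine ⟨by omega, fun _ => hfit, fun k h1 h2 => fun hPk => ?_⟩
          exact absurd (le_trans (Jf_mono units (j+1) k (by omega) (by omega)) hPk) (by omega)
        rw [h2]
      · rw [if_neg (by rw [hjoin]; omega)]
        exact ih (j + 1) (by omega) (by omega) (by omega)

-- ===== VERDICT (by name: the statement is the Claim_ definition above) =====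
theorem tail_for_overlap_py_spec : Claim_equal_tail_for_overlap_py := by
  intro units max_chars _hdom
  unfold Spec_tail_for_overlap_py tail_for_overlap_py tail_for_overlap_py_alt
  by_cases hg : max_chars ≤ 0 ∨ units = []
  · rw [if_pos hg, if_pos hg]
  · rw [if_neg hg, if_neg hg]
    rw [not_or] at hg
    have hmc : 0 < max_chars := by omega
    have hfit0 : Jf units 0 ≤ max_chars := by rw [Jf_zero]; omega
    have hb := pvBsearch_eq units max_chars 0 units.length (by omega) le_rfl hfit0
    have ha := pvLoopA_eq units max_chars units.length 0 (by omega) (by omega) hfit0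
    simp only [Nat.sub_zero, List.drop_zero] at ha
    show pvLoopA max_chars units.reverse [] =
      units.drop (units.length - pvBsearch ((0 : Int) :: pvBuildSuff (units.reverse.map (fun u => (u.length : Int))) 0) max_chars 0 units.length)
    rw [hb]
    have hd : ([] : List String) = units.drop units.length := by simp
    rw [hd]
    exact ha
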